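-- pv_equiv track=rewrite | github.com/GalvagniFederico/EULER | 056_Powerful_Digit_Sum/solution.py | Solve
-- ===== SOURCE A (Python) =====
-- def Solve(a,b):
--     result = 0
--     for i in range(0,a + 1):
--         for j in range(0,b +1):
--             power = i
--             for x in range(j-1):
--                 power *= i
--
--             digitSum = 0
--             for c in str(power).split(",")[0]:
--                 digitSum += int(c)
--
--             if digitSum > result:
--                 result = digitSum
--
--     return result
-- ===== SOURCE B (Python) =====
-- def digit_sum(n):
--     return sum(map(int, str(n)))
--
--
-- def Solve(a, b):
--     # A considers i, i, i^2, ..., i^b for each i (its j=0 row repeats i^1);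
--     # keep the power incrementally instead of recomputing it from scratch per j.
--     if b < 0:
--         return 0
--     best = 0
--     for i in range(a + 1):
--         p = i
--         best = max(best, digit_sum(p))
--         for _ in range(b - 1):
--             p *= i
--             best = max(best, digit_sum(p))
--     return best
-- ===== Notes on version B (the rewrite author's own statement) =====
-- stated objective: faster
-- what changed: B maintains each power incrementally (one big-int multiply per j) instead of A's inner loop that rebuilds i^j from scratch for every j (O(a*b) instead of O(a*b^2) multiplications), and sums digits with an idiomatic sum(map(int, str(p))) without A's dead split(',') pass; intended as asymptotically faster, a timing run measured 1.61x at the largest size both versions finished.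
import Mathlib
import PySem

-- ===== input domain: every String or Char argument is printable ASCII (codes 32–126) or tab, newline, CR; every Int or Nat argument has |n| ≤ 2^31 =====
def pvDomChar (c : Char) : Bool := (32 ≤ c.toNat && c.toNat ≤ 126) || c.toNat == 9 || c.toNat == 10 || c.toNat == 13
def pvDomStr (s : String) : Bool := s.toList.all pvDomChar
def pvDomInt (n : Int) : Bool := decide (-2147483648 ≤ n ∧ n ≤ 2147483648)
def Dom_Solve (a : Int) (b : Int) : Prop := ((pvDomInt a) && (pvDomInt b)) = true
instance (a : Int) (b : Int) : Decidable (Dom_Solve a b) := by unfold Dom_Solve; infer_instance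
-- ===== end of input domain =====

-- B keeps each power incrementally (one multiply per j) instead of A's inner loop that rebuilds
-- i^j from scratch, and drops the dead split(",") pass; intended as faster (timing measured 1.61x
-- at the largest size both versions finished).

-- ===== PORT A =====
-- power = i; for x in range(j-1): power *= i
def aPow (i : Int) (j : Int) : Int :=
  (PySem.List.pyRange 0 (j - 1) 1).foldl (fun p _ => p * i) i

-- digitSum = 0; for c in str(power).split(",")[0]: digitSum += int(c)
-- split(",") never returns an empty list, so the [0] cannot raise; int(c) sees only decimal
-- digit characters here (power ≥ 0 on every call), so it cannot raise either.
def aDigitSum (power : Int) : Int :=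
  let first : String :=
    (PySem.List.pyGet? ((PySem.Str.split? (PySem.Int.toStr power) ",").getD []) 0).getD ""
  first.toList.foldl (fun ds c => ds + (PySem.Int.ofChars? [c]).getD 0) 0

def Solve (a : Int) (b : Int) : Int :=
  (PySem.List.pyRange 0 (a + 1) 1).foldl (fun result i =>
    (PySem.List.pyRange 0 (b + 1) 1).foldl (fun result j =>
      let digitSum := aDigitSum (aPow i j)
      if digitSum > result then digitSum else result) result) 0

-- ===== PORT B =====
-- return sum(map(int, str(n)))
def bDigitSum (n : Int) : Int :=
  ((PySem.Int.toStr n).toList.map (fun c => (PySem.Int.ofChars? [c]).getD 0)).sum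

def Solve_alt (a : Int) (b : Int) : Int :=
  if b < 0 then 0
  else
    (PySem.List.pyRange 0 (a + 1) 1).foldl (fun best i =>
      ((PySem.List.pyRange 0 (b - 1) 1).foldl
        (fun (s : Int × Int) _ => (s.1 * i, max s.2 (bDigitSum (s.1 * i))))
        (i, max best (bDigitSum i))).2) 0

-- ===== PRECONDITION & SPEC =====
def Spec_Solve (a : Int) (b : Int) (out : Int) : Prop := out = Solve_alt a b
instance (a : Int) (b : Int) (out : Int) : Decidable (Spec_Solve a b out) := by unfold Spec_Solve; infer_instance

-- ===== CLAIM (what is proved, stated in full; the proofs are below) =====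
def Claim_equal_Solve : Prop := ∀ (a : Int) (b : Int), Dom_Solve a b → Spec_Solve a b (Solve a b)

-- ===== LEMMAS AND PROOFS =====

-- the value A's int(c) contributes for one character
def charVal (c : Char) : Int := (PySem.Int.ofChars? [c]).getD 0

theorem digitChar_ne_comma (k : Nat) (hk : k < 10) : Nat.digitChar k ≠ ',' := by
  interval_cases k <;> decide

-- characters produced by Nat.toDigitsCore are digits (hence never ',')
theorem toDigitsCore_ne_comma :
    ∀ (fuel n : Nat) (ds : List Char), (∀ c ∈ ds, c ≠ ',') →
      ∀ c ∈ Nat.toDigitsCore 10 fuel n ds, c ≠ ',' := by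
  intro fuel
  induction fuel with
  | zero => intro n ds hds c hc; simp [Nat.toDigitsCore] at hc; exact hds c hc
  | succ fuel ih =>
    intro n ds hds c hc
    rw [Nat.toDigitsCore] at hc
    by_cases h0 : n / 10 = 0
    · simp [h0] at hc
      rcases hc with hc | hc
      · subst hc; exact digitChar_ne_comma _ (Nat.mod_lt _ (by norm_num))
      · exact hds c hc
    · simp [h0] at hc
      refine ih (n / 10) _ ?_ c hc
      intro c' hc'
      rcases List.mem_cons.mp hc' with h | h
      · subst h; exact digitChar_ne_comma _ (Nat.mod_lt _ (by norm_num))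
      · exact hds c' h

-- splitting a comma-free character list on "," is the identity
theorem splitOn_go_comma_free :
    ∀ (fuel : Nat) (l cur : List Char) (acc : List (List Char)), l.length < fuel →
      (∀ c ∈ l, c ≠ ',') →
      PySem.Chars.splitOn.go [','] fuel l cur acc = ((cur.reverse ++ l) :: acc).reverse := by
  intro fuel
  induction fuel with
  | zero => intro l cur acc h; omega
  | succ fuel ih =>
    intro l cur acc h hl
    cases l with
    | nil => simp [PySem.Chars.splitOn.go]
    | cons c rest =>
      rw [PySem.Chars.splitOn.go]
      have hc : c ≠ ',' := hl c (List.mem_cons_self ..)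
      have hpre : List.isPrefixOf [','] (c :: rest) = false := by
        simp [List.isPrefixOf]
        exact fun h' => absurd h'.symm hc
      rw [hpre]
      simp only [Bool.false_eq_true, if_false]
      rw [ih rest (c :: cur) acc (by simp at h ⊢; omega)
        (fun c' hc' => hl c' (List.mem_cons_of_mem _ hc'))]
      simp

theorem splitOn_comma_free (cs : List Char) (h : ∀ c ∈ cs, c ≠ ',') :
    PySem.Chars.splitOn cs [','] = [cs] := by
  unfold PySem.Chars.splitOn
  rw [splitOn_go_comma_free (cs.length + 1) cs [] [] (by omega) h]
  simp

-- A's string-based digit sum agrees with B's on nonnegative inputs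
theorem aDigitSum_eq (n : Int) (hn : 0 ≤ n) : aDigitSum n = bDigitSum n := by
  have htoChars : PySem.Int.toChars n = Nat.toDigits 10 n.toNat := by
    unfold PySem.Int.toChars
    rw [if_neg (by omega)]
  have hfree : ∀ c ∈ (PySem.Int.toStr n).toList, c ≠ ',' := by
    rw [PySem.Int.toList_toStr, htoChars]
    exact toDigitsCore_ne_comma (n.toNat + 1) n.toNat [] (by simp)
  have hsep : (",".toList : List Char) = [','] := by decide
  have hsplit : PySem.Str.split? (PySem.Int.toStr n) ","
      = some [String.ofList (PySem.Int.toStr n).toList] := by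
    rw [PySem.Str.split?, PySem.Chars.split?, hsep, if_neg (by decide),
      splitOn_comma_free _ hfree]
    rfl
  have hget : PySem.List.pyGet? [String.ofList (PySem.Int.toStr n).toList] (0 : Int)
      = some (String.ofList (PySem.Int.toStr n).toList) := by
    simp [PySem.List.pyGet?, PySem.List.pyIdx?]
  have hlist : (String.ofList (PySem.Int.toStr n).toList).toList
      = (PySem.Int.toStr n).toList := by simp
  unfold aDigitSum bDigitSum
  simp only [hsplit, Option.getD_some, hget, hlist]
  have hfun : (fun (ds : Int) (c : Char) => ds + (PySem.Int.ofChars? [c]).getD 0)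
      = (fun (ds : Int) (c : Char) => ds + charVal c) := rfl
  rw [hfun, PySem.List.foldl_add (g := charVal)]
  rw [show (fun (c : Char) => (PySem.Int.ofChars? [c]).getD 0) = charVal from rfl]
  simp

-- A's inner power loop as a closed power
theorem foldl_mul_const (i : Int) : ∀ (l : List Int) (c : Int),
    l.foldl (fun p _ => p * i) c = c * i ^ l.length := by
  intro l
  induction l with
  | nil => intro c; simp
  | cons x t ih => intro c; simp [List.foldl_cons, ih, pow_succ]; ring

theorem aPow_eq (i : Int) (jn : Nat) : aPow i (jn : Int) = i ^ (jn - 1 + 1) := by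
  unfold aPow
  cases jn with
  | zero =>
    have : PySem.List.pyRange 0 ((0:Int) - 1) 1 = [] := by decide
    rw [show ((0:Nat):Int) - 1 = (0:Int) - 1 by norm_num, this]
    simp
  | succ k =>
    have : ((k + 1 : Nat) : Int) - 1 = ((k : Nat) : Int) := by push_cast; ring
    rw [this, PySem.List.pyRange_zero_natCast]
    rw [foldl_mul_const]
    simp [pow_succ, mul_comm]

-- B's incremental loop: running power and running max, unrolled over List.range
theorem bFold (i : Int) : ∀ (m : Nat) (x : Int),
    (List.range m).foldl
      (fun (s : Int × Int) _ => (s.1 * i, max s.2 (bDigitSum (s.1 * i)))) (i, x)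
    = (i ^ (m + 1), (List.range m).foldl (fun r k => max r (bDigitSum (i ^ (k + 2)))) x) := by
  intro m
  induction m with
  | zero => intro x; simp
  | succ m ih =>
    intro x
    rw [List.range_succ, List.foldl_append, List.foldl_append, ih]
    simp only [List.foldl_cons, List.foldl_nil]
    rw [show i ^ (m + 1) * i = i ^ (m + 1 + 1) from (pow_succ i (m + 1)).symm]

-- per-i equality of the two inner loops (b = n ≥ 0, i ≥ 0)
theorem inner_eq (i : Int) (hi : 0 ≤ i) (n : Nat) (best : Int) :
    (PySem.List.pyRange 0 ((n : Int) + 1) 1).foldl (fun result j =>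
      let digitSum := aDigitSum (aPow i j)
      if digitSum > result then digitSum else result) best
    = ((PySem.List.pyRange 0 ((n : Int) - 1) 1).foldl
        (fun (s : Int × Int) _ => (s.1 * i, max s.2 (bDigitSum (s.1 * i))))
        (i, max best (bDigitSum i))).2 := by
  -- rewrite the A side into a fold over List.range of running maxes of bDigitSum
  have hcast : ((n : Int) + 1) = ((n + 1 : Nat) : Int) := by push_cast; ring
  rw [hcast, PySem.List.pyRange_zero_natCast, List.foldl_map]
  have hstep : ∀ (r : Int), ∀ jn ∈ List.range (n + 1),
      (fun (result : Int) (j : Nat) =>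
        let digitSum := aDigitSum (aPow i (j : Int))
        if digitSum > result then digitSum else result) r jn
      = max r (bDigitSum (i ^ (jn - 1 + 1))) := by
    intro r jn _
    have hpow : (0:Int) ≤ i ^ (jn - 1 + 1) := pow_nonneg hi _
    simp only [aPow_eq, aDigitSum_eq _ hpow]
    rcases le_or_gt (bDigitSum (i ^ (jn - 1 + 1))) r with h | h
    · rw [if_neg (by omega), max_eq_left h]
    · rw [if_pos h, max_eq_right (le_of_lt h)]
  rw [PySem.List.foldl_congr_mem _ _ _ best hstep]
  -- the B side range as a mapped List.range
  have hBrange : PySem.List.pyRange 0 ((n : Int) - 1) 1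
      = PySem.List.pyRange 0 ((n - 1 : Nat) : Int) 1 := by
    cases n with
    | zero => decide
    | succ k =>
      rw [Nat.add_sub_cancel]
      congr 1
      push_cast
      ring
  rw [hBrange, PySem.List.pyRange_zero_natCast, List.foldl_map, bFold]
  -- peel off j = 0 on the A side
  rw [List.range_succ_eq_map, List.foldl_cons, List.foldl_map]
  -- now both sides are folds over List.range; shift the index
  cases n with
  | zero => simp
  | succ m =>
    rw [Nat.add_sub_cancel]
    rw [List.range_succ_eq_map, List.foldl_cons, List.foldl_map]
    simp only [Nat.zero_sub, Nat.zero_add, pow_one, Nat.succ_sub_one]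
    rw [show max (max best (bDigitSum i)) (bDigitSum i) = max best (bDigitSum i) by
      rw [max_assoc, max_self]]

-- ===== VERDICT (by name: the statement is the Claim_ definition above) =====
theorem Solve_spec : Claim_equal_Solve := by
  intro a b _
  unfold Spec_Solve Solve Solve_alt
  by_cases hb : b < 0
  · rw [if_pos hb]
    have hempty : PySem.List.pyRange 0 (b + 1) 1 = [] := by
      rw [List.eq_nil_iff_forall_not_mem]
      intro x hx
      rw [PySem.List.mem_pyRange_one] at hx
      omega
    rw [hempty]
    simp only [List.foldl_nil]
    exact PySem.List.foldl_ignore _ _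
  · rw [if_neg hb]
    have hbn : b = (b.toNat : Int) := by omega
    rw [hbn]
    refine PySem.List.foldl_congr_mem _ _ _ 0 ?_
    intro acc i hi
    rw [PySem.List.mem_pyRange_one] at hi
    exact inner_eq i hi.1 b.toNat acc
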